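-- pv_equiv track=rewrite | github.com/hPixal/pds | src/2025/g2/1.py | eq2
-- ===== SOURCE A (Python) =====
-- def eq2(n, x_n):  # x_n is an array
--     n0 = 2
--     up_n = n + n0
--     low_n = n - n0
--     result = 0
--
--     for k in range(int(low_n), int(up_n) + 1):
--         if 0 <= k < len(x_n):  # Ensure index is within bounds
--             result += x_n[k]
--     return result
-- ===== SOURCE B (Python) =====
-- def eq2(n, x_n):  # x_n is an array
--     pre = [0]
--     for x in x_n:
--         pre.append(pre[-1] + x)
--     L = len(x_n)
--     lo = min(max(0, n - 2), L)
--     hi = min(max(0, n + 3), L)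
--     return pre[hi] - pre[lo]
-- ===== Notes on version B (the rewrite author's own statement) =====
-- stated objective: alternative
-- what changed: B builds a running prefix-sum list in one staged pass and returns the difference of two prefix sums at the clamped window bounds, instead of A's index loop over [n-2, n+2] with a per-index bounds test.
import Mathlib
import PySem

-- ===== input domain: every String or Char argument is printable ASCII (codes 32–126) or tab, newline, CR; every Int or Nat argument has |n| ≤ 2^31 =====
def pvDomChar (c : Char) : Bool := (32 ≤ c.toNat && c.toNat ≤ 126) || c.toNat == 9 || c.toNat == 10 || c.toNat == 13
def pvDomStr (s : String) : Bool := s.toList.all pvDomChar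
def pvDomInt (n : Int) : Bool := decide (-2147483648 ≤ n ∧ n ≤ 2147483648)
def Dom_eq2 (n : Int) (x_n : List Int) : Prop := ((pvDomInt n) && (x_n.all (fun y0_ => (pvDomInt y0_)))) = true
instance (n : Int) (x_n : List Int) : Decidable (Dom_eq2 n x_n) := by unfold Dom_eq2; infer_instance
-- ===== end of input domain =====

-- B computes the answer as a difference of two prefix sums at the clamped window
-- bounds instead of A's guarded index loop (objective: alternative).

-- ===== PORT A =====
def eq2 (n : Int) (x_n : List Int) : Int :=
  let n0 : Int := 2
  let up_n := n + n0
  let low_n := n - n0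
  (PySem.List.pyRange low_n (up_n + 1) 1).foldl
    (fun result k =>
      if 0 ≤ k ∧ k < PySem.List.len x_n then result + PySem.List.pyGetD x_n k 0 else result) 0

-- ===== PORT B =====
def eq2_alt (n : Int) (x_n : List Int) : Int :=
  let pre := x_n.foldl (fun pre x => pre ++ [PySem.List.pyGetD pre (-1) 0 + x]) [0]
  let L := PySem.List.len x_n
  let lo := min (max 0 (n - 2)) L
  let hi := min (max 0 (n + 3)) L
  PySem.List.pyGetD pre hi 0 - PySem.List.pyGetD pre lo 0

-- ===== PRECONDITION & SPEC =====
def Spec_eq2 (n : Int) (x_n : List Int) (out : Int) : Prop := out = eq2_alt n x_n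
instance (n : Int) (x_n : List Int) (out : Int) : Decidable (Spec_eq2 n x_n out) := by unfold Spec_eq2; infer_instance

-- ===== CLAIM (what is proved, stated in full; the proofs are below) =====
def Claim_equal_eq2 : Prop := ∀ (n : Int) (x_n : List Int), Dom_eq2 n x_n → Spec_eq2 n x_n (eq2 n x_n)

-- ===== LEMMAS AND PROOFS =====

-- Filtering a unit-step range by the bounds test [0, L) yields the clamped range.
theorem filter_pyRange_bounds (L : Int) : ∀ (m : Nat) (a b : Int), (b - a).toNat = m →
    (PySem.List.pyRange a b 1).filter (fun k => decide (0 ≤ k ∧ k < L))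
      = PySem.List.pyRange (max 0 a) (max 0 (min L b)) 1 := by
  intro m
  induction m with
  | zero =>
      intro a b h
      rw [PySem.List.pyRange_one_eq_nil (by omega), PySem.List.pyRange_one_eq_nil (by omega)]
      rfl
  | succ m ih =>
      intro a b h
      have hab : a < b := by omega
      rw [PySem.List.pyRange_one_cons hab]
      by_cases hp : 0 ≤ a ∧ a < L
      · rw [List.filter_cons_of_pos (by simpa using hp), ih (a + 1) b (by omega),
            show max 0 a = a from by omega, show max 0 (a + 1) = a + 1 from by omega,
            PySem.List.pyRange_one_cons (show a < max 0 (min L b) from by omega)]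
      · rw [List.filter_cons_of_neg (by simpa using hp), ih (a + 1) b (by omega)]
        by_cases ha : 0 ≤ a
        · rw [PySem.List.pyRange_one_eq_nil (by omega), PySem.List.pyRange_one_eq_nil (by omega)]
        · congr 1
          omega

-- A's guarded accumulation loop is the sum over the filtered index list.
theorem foldl_guarded_sum (xs : List Int) : ∀ (l : List Int) (r : Int),
    l.foldl (fun result k =>
        if 0 ≤ k ∧ k < PySem.List.len xs then result + PySem.List.pyGetD xs k 0 else result) r
      = r + ((l.filter (fun k => decide (0 ≤ k ∧ k < PySem.List.len xs))).map
              (fun k => PySem.List.pyGetD xs k 0)).sum := by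
  intro l
  induction l with
  | nil => intro r; simp
  | cons a t ih =>
      intro r
      rw [List.foldl_cons]
      by_cases h : 0 ≤ a ∧ a < PySem.List.len xs
      · rw [if_pos h, List.filter_cons_of_pos (by simpa using h), List.map_cons,
            List.sum_cons, ih, add_assoc]
      · rw [if_neg h, List.filter_cons_of_neg (by simpa using h), ih]

-- Reading the clamped range through pyGetD is a drop-then-take segment of the list.
theorem map_pyGetD_pyRange_eq_seg (xs : List Int) (lo hi : Int)
    (hlo : 0 ≤ lo) (hle : hi ≤ (xs.length : Int)) :
    (PySem.List.pyRange lo hi 1).map (fun k => PySem.List.pyGetD xs k 0)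
      = (xs.drop lo.toNat).take ((hi - lo).toNat) := by
  apply List.ext_getElem
  · simp [PySem.List.length_pyRange_one]
    omega
  · intro i h1 h2
    simp only [List.getElem_map, PySem.List.getElem_pyRange_one]
    have hi1 : i < (hi - lo).toNat := by
      simpa [PySem.List.length_pyRange_one] using h1
    have hidx : lo.toNat + i < xs.length := by omega
    rw [List.getElem_take, List.getElem_drop]
    have : lo + ↑i = ((lo.toNat + i : Nat) : Int) := by omega
    rw [this, PySem.List.pyGetD_natCast]
    simp [hidx]

-- B's first pass produces the list of all prefix sums of xs.
theorem pre_fold_eq (xs : List Int) :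
    xs.foldl (fun pre x => pre ++ [PySem.List.pyGetD pre (-1) 0 + x]) ([0] : List Int)
      = (List.range (xs.length + 1)).map (fun k => (xs.take k).sum) := by
  induction xs using List.reverseRecOn with
  | nil => simp
  | append_singleton ys x ih =>
      rw [List.foldl_append, ih, List.foldl_cons, List.foldl_nil]
      have hlast :
          PySem.List.pyGetD ((List.range (ys.length + 1)).map (fun k => (ys.take k).sum)) (-1) 0
            = ys.sum := by
        rw [List.range_succ, List.map_append, List.map_cons, List.map_nil,
            PySem.List.pyGetD_neg_one_append_singleton]
        simp
      have hmapeq : (List.range (ys.length + 1)).map (fun k => (List.take k (ys ++ [x])).sum)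
          = (List.range (ys.length + 1)).map (fun k => (List.take k ys).sum) := by
        apply List.map_congr_left
        intro k hk
        rw [List.take_append_of_le_length (by have := List.mem_range.mp hk; omega)]
      rw [hlast,
          show (ys ++ [x]).length + 1 = ys.length + 1 + 1 from by simp,
          show List.range (ys.length + 1 + 1)
              = List.range (ys.length + 1) ++ [ys.length + 1] from List.range_succ,
          List.map_append, hmapeq, List.map_cons, List.map_nil]
      congr 2
      rw [show ys.length + 1 = (ys ++ [x]).length from by simp, List.take_length]
      simp

-- Reading the prefix-sum list at an in-range index gives the prefix sum.
theorem pyGetD_pre (xs : List Int) (k : Int) (h0 : 0 ≤ k) (hle : k ≤ (xs.length : Int)) :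
    PySem.List.pyGetD ((List.range (xs.length + 1)).map (fun j => (xs.take j).sum)) k 0
      = (xs.take k.toNat).sum := by
  have hk : k = ((k.toNat : Nat) : Int) := by omega
  rw [hk, PySem.List.pyGetD_natCast]
  have hlt : k.toNat < xs.length + 1 := by omega
  simp [List.getD, hlt]
  congr 2
  omega

-- A segment sum is a difference of prefix sums.
theorem seg_sum_eq_sub (xs : List Int) (a b : Nat) (hab : a ≤ b) :
    ((xs.drop a).take (b - a)).sum = (xs.take b).sum - (xs.take a).sum := by
  have : xs.take b = xs.take a ++ (xs.drop a).take (b - a) := by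
    rw [← List.take_add]
    congr 1
    omega
  rw [this, List.sum_append]
  ring

-- ===== VERDICT (by name: the statement is the Claim_ definition above) =====
theorem eq2_spec : Claim_equal_eq2 := by
  intro n x_n _
  show eq2 n x_n = eq2_alt n x_n
  simp only [eq2, eq2_alt]
  rw [foldl_guarded_sum x_n,
      show n + 2 + 1 = n + 3 from by ring,
      filter_pyRange_bounds (PySem.List.len x_n) (n + 3 - (n - 2)).toNat (n - 2) (n + 3) rfl,
      pre_fold_eq x_n]
  have hL : PySem.List.len x_n = (x_n.length : Int) := PySem.List.len_eq x_n
  set L : Int := (x_n.length : Int) with hLdef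
  have hL0 : 0 ≤ L := by positivity
  rw [hL]
  by_cases hcase : max 0 (n - 2) < max 0 (min L (n + 3))
  · -- non-empty clamped range
    have h3 : (max 0 (min L (n + 3)) - max 0 (n - 2)).toNat
        = (max 0 (min L (n + 3))).toNat - (max 0 (n - 2)).toNat := by omega
    rw [map_pyGetD_pyRange_eq_seg x_n _ _ (by omega) (by omega), h3,
        seg_sum_eq_sub x_n (max 0 (n - 2)).toNat (max 0 (min L (n + 3))).toNat (by omega),
        pyGetD_pre x_n _ (by omega) (by omega),
        pyGetD_pre x_n _ (by omega) (by omega)]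
    have h1 : (max 0 (min L (n + 3))).toNat = (min (max 0 (n + 3)) L).toNat := by omega
    have h2 : (max 0 (n - 2)).toNat = (min (max 0 (n - 2)) L).toNat := by omega
    rw [h1, h2]
    ring
  · -- empty clamped range: both sides are 0
    rw [PySem.List.pyRange_one_eq_nil (by omega)]
    rw [pyGetD_pre x_n _ (by omega) (by omega),
        pyGetD_pre x_n _ (by omega) (by omega)]
    have : (min (max 0 (n + 3)) L).toNat = (min (max 0 (n - 2)) L).toNat := by omega
    rw [this]
    simp
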